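-- pv_equiv track=rewrite | github.com/MassimoQu/coop_calib | opencood/extrinsics/pose_correction/stage1_pgc_pose.py | _resolve_agent_index
-- ===== SOURCE A (Python) =====
-- from typing import Any, Dict, Mapping, MutableMapping, Optional, Sequence, Tuple
--
-- def _normalize_agent_role(raw: Any) -> Optional[str]:
--     if raw is None:
--         return None
--     name = str(raw).lower()
--     if "veh" in name or "vehicle" in name:
--         return "vehicle"
--     if "infra" in name or "rsu" in name or "infrastructure" in name:
--         return "infrastructure"
--     return None
--
-- def _infer_dair_role_from_base(base_data_dict: Mapping[Any, Any], cav_id: Any) -> Optional[str]: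
--     entry = base_data_dict.get(cav_id)
--     if not isinstance(entry, Mapping):
--         return None
--     params = entry.get("params") or {}
--     if not isinstance(params, Mapping):
--         return None
--     vehicles_all = params.get("vehicles_all")
--     if isinstance(vehicles_all, list):
--         return "vehicle" if len(vehicles_all) > 0 else "infrastructure"
--     vehicles_front = params.get("vehicles_front")
--     if isinstance(vehicles_front, list):
--         return "vehicle" if len(vehicles_front) > 0 else "infrastructure"
--     return None
--
-- def _resolve_agent_index(
--     all_agent_ids: Sequence[Any],
--     cav_id: Any,
--     base_data_dict: Mapping[Any, Any],
-- ) -> Optional[int]: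
--     cav_str = str(cav_id)
--     for idx, agent_id in enumerate(all_agent_ids):
--         if str(agent_id) == cav_str:
--             return int(idx)
--     role = _infer_dair_role_from_base(base_data_dict, cav_id)
--     if role is None:
--         return None
--     for idx, agent_id in enumerate(all_agent_ids):
--         if _normalize_agent_role(agent_id) == role:
--             return int(idx)
--     return None
-- ===== SOURCE B (Python) =====
-- from typing import Any, Mapping, Optional, Sequence
--
--
-- def _normalize_agent_role(raw: Any) -> Optional[str]:
--     if raw is None:
--         return None
--     name = str(raw).lower()
--     if "veh" in name or "vehicle" in name:
--         return "vehicle"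
--     if "infra" in name or "rsu" in name or "infrastructure" in name:
--         return "infrastructure"
--     return None
--
--
-- def _infer_dair_role_from_base(base_data_dict: Mapping[Any, Any], cav_id: Any) -> Optional[str]:
--     entry = base_data_dict.get(cav_id)
--     if not isinstance(entry, Mapping):
--         return None
--     params = entry.get("params") or {}
--     if not isinstance(params, Mapping):
--         return None
--     vehicles_all = params.get("vehicles_all")
--     if isinstance(vehicles_all, list):
--         return "vehicle" if len(vehicles_all) > 0 else "infrastructure"
--     vehicles_front = params.get("vehicles_front")
--     if isinstance(vehicles_front, list):
--         return "vehicle" if len(vehicles_front) > 0 else "infrastructure"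
--     return None
--
--
-- def _resolve_agent_index(all_agent_ids, cav_id, base_data_dict):
--     # Single pass: exact id match returns immediately; first role match is
--     # remembered as a fallback and returned only if no exact match exists.
--     cav_str = str(cav_id)
--     role = _infer_dair_role_from_base(base_data_dict, cav_id)
--     fallback = None
--     for idx, agent_id in enumerate(all_agent_ids):
--         if str(agent_id) == cav_str:
--             return int(idx)
--         if role is not None and fallback is None and _normalize_agent_role(agent_id) == role:
--             fallback = int(idx)
--     return fallback
-- ===== Notes on version B (the rewrite author's own statement) =====
-- stated objective: alternative
-- what changed: Replaces A's two sequential scans (exact-id scan, then a second role-match scan) by a single enumerate pass that computes the inferred role once up front and records the first role match in a fallback variable while still returning an exact match immediately.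
import Mathlib
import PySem

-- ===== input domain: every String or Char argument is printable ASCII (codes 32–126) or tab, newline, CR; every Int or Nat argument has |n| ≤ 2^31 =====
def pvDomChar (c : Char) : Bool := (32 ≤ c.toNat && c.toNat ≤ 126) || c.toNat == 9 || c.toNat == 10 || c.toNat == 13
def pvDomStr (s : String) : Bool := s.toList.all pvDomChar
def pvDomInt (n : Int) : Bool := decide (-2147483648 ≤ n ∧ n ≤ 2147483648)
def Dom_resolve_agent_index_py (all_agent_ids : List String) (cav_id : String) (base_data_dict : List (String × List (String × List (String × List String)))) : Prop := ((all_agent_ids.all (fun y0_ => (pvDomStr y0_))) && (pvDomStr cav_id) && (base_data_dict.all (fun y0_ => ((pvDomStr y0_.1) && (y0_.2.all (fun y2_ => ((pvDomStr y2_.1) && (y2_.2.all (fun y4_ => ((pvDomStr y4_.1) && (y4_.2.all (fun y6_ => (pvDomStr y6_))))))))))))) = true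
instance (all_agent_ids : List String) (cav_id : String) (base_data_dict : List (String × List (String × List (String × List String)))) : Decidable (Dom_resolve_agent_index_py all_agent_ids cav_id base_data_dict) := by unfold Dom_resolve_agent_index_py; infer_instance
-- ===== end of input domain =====

-- B merges A's two sequential scans into one pass with a remembered first-role-match fallback; same results, same cost (objective: alternative).

-- ===== PORT A =====
-- shared helper: _normalize_agent_role (raw is always a str here, so the None check is vacuous)
def pv_normalize_agent_role (raw : String) : Option String :=
  let name := PySem.Str.lower raw
  if PySem.Str.isIn "veh" name || PySem.Str.isIn "vehicle" name then some "vehicle"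
  else if PySem.Str.isIn "infra" name || PySem.Str.isIn "rsu" name || PySem.Str.isIn "infrastructure" name then
    some "infrastructure"
  else none

-- shared helper: _infer_dair_role_from_base (isinstance checks are vacuously true at these types;
-- `entry.get("params") or {}` = getD [] since an empty dict is falsy)
def pv_infer_dair_role (base_data_dict : List (String × List (String × List (String × List String)))) (cav_id : String) : Option String :=
  match (PySem.Dict.mk base_data_dict).get? cav_id with
  | none => none
  | some entry =>
    let params := ((PySem.Dict.mk entry).get? "params").getD []
    match (PySem.Dict.mk params).get? "vehicles_all" with
    | some va => some (if va.length > 0 then "vehicle" else "infrastructure")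
    | none =>
      match (PySem.Dict.mk params).get? "vehicles_front" with
      | some vf => some (if vf.length > 0 then "vehicle" else "infrastructure")
      | none => none

-- A's first loop: first index whose str equals cav_str
def pv_scan_id : List String → String → Int → Option Int
  | [], _, _ => none
  | a :: t, cav, i => if a = cav then some i else pv_scan_id t cav (i + 1)

-- A's second loop: first index whose normalized role equals role
def pv_scan_role : List String → String → Int → Option Int
  | [], _, _ => none
  | a :: t, r, i => if pv_normalize_agent_role a = some r then some i else pv_scan_role t r (i + 1)

def resolve_agent_index_py (all_agent_ids : List String) (cav_id : String) (base_data_dict : List (String × List (String × List (String × List String)))) : Option Int :=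
  match pv_scan_id all_agent_ids cav_id 0 with
  | some i => some i
  | none =>
    match pv_infer_dair_role base_data_dict cav_id with
    | none => none
    | some role => pv_scan_role all_agent_ids role 0

-- ===== PORT B =====
-- B's single loop over enumerate(all_agent_ids) with the fallback accumulator
def pvB_loop : List String → String → Option String → Option Int → Int → Option Int
  | [], _, _, fb, _ => fb
  | a :: t, cav, role, fb, i =>
    if a = cav then some i
    else
      pvB_loop t cav role
        (if role.isSome && fb.isNone && decide (pv_normalize_agent_role a = role) then some i else fb)
        (i + 1)

def resolve_agent_index_py_alt (all_agent_ids : List String) (cav_id : String) (base_data_dict : List (String × List (String × List (String × List String)))) : Option Int :=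
  pvB_loop all_agent_ids cav_id (pv_infer_dair_role base_data_dict cav_id) none 0

-- ===== PRECONDITION & SPEC =====
def Spec_resolve_agent_index_py (all_agent_ids : List String) (cav_id : String) (base_data_dict : List (String × List (String × List (String × List String)))) (out : Option Int) : Prop := out = resolve_agent_index_py_alt all_agent_ids cav_id base_data_dict
instance (all_agent_ids : List String) (cav_id : String) (base_data_dict : List (String × List (String × List (String × List String)))) (out : Option Int) : Decidable (Spec_resolve_agent_index_py all_agent_ids cav_id base_data_dict out) := by unfold Spec_resolve_agent_index_py; infer_instance

-- ===== CLAIM (what is proved, stated in full; the proofs are below) =====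
def Claim_equal_resolve_agent_index_py : Prop := ∀ (all_agent_ids : List String) (cav_id : String) (base_data_dict : List (String × List (String × List (String × List String)))), Dom_resolve_agent_index_py all_agent_ids cav_id base_data_dict → Spec_resolve_agent_index_py all_agent_ids cav_id base_data_dict (resolve_agent_index_py all_agent_ids cav_id base_data_dict)

-- ===== LEMMAS AND PROOFS =====
-- B's loop = first id match, else (with a role) the first role match, else the incoming fallback
theorem pvB_loop_eq (l : List String) (cav : String) (role : Option String) (fb : Option Int) (i : Int) :
    pvB_loop l cav role fb i =
      match pv_scan_id l cav i with
      | some k => some k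
      | none =>
        match role with
        | none => fb
        | some r =>
          match fb with
          | some j => some j
          | none => pv_scan_role l r i := by
  induction l generalizing fb i with
  | nil => cases role <;> cases fb <;> simp [pvB_loop, pv_scan_id, pv_scan_role]
  | cons a t ih =>
    by_cases h : a = cav
    · simp [pvB_loop, pv_scan_id, h]
    · cases role with
      | none => simp [pvB_loop, pv_scan_id, h, ih]
      | some r =>
        cases fb with
        | some j => simp [pvB_loop, pv_scan_id, h, ih]
        | none =>
          by_cases hr : pv_normalize_agent_role a = some r
          · simp [pvB_loop, pv_scan_id, pv_scan_role, h, hr, ih]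
          · simp [pvB_loop, pv_scan_id, pv_scan_role, h, hr, ih]

-- ===== VERDICT (by name: the statement is the Claim_ definition above) =====
theorem resolve_agent_index_py_spec : Claim_equal_resolve_agent_index_py := by
  intro ids cav bdd _
  unfold Spec_resolve_agent_index_py resolve_agent_index_py resolve_agent_index_py_alt
  rw [pvB_loop_eq]
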